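-- pv_equiv track=rewrite | github.com/gabriel-peter/CS3000 | hw3/1.py | FindSched
-- ===== SOURCE A (Python) =====
-- v = [0,3,5,7,6,13,3,8]
--
-- p = [0,0,1,0,2,1,4,3]
--
-- def FindSched(M,n):
--     if n == 0:
--         return []
--     elif n == 1:
--         return [1]
--     elif (v[n] + M[p[n]] > M[n-1]):
--         return [n] + FindSched(M, p[n])
--     else:
--         return FindSched(M,n-1)
-- ===== SOURCE B (Python) =====
-- v = [0,3,5,7,6,13,3,8]
--
-- p = [0,0,1,0,2,1,4,3]
--
-- def FindSched(M, n):
--     # Stage 1: precompute the DP decision for every index 2..n in one comprehension.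
--     take = [False, False] + [v[i] + M[p[i]] > M[i - 1] for i in range(2, n + 1)]
--     # Stage 2: walk the decision table down from n, collecting chosen intervals.
--     result = []
--     i = n
--     while i > 1:
--         if take[i]:
--             result.append(i)
--             i = p[i]
--         else:
--             i -= 1
--     if i == 1:
--         result.append(1)
--     return result
-- ===== Notes on version B (the rewrite author's own statement) =====
-- stated objective: alternative
-- what changed: Replaces the recursion by two staged passes: first a comprehension precomputes the boolean decision table for all indices 2..n, then a simple iterative walk over that table collects the schedule into an accumulator.
-- outside the precondition, e.g. on FindSched([0, 0, 0, 0, 0, 0, 0, 0], -1): A returns [-1, 3], B returns []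
import Mathlib
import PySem

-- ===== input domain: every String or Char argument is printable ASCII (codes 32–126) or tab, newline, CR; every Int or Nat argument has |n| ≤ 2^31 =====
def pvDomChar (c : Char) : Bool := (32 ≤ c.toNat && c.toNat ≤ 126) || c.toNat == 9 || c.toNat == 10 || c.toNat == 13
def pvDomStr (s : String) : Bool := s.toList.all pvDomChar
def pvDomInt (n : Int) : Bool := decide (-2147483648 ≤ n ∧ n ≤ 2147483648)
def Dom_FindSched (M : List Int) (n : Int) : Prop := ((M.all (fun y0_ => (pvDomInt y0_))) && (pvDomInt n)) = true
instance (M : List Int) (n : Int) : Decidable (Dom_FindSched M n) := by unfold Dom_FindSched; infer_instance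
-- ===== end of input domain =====

-- B splits A's recursion into two staged passes: a precomputed boolean decision table, then an iterative walk over it (same O(n) cost, different decomposition).


-- module constants v and p from the Python source
def vTab : List Int := [0, 3, 5, 7, 6, 13, 3, 8]
def pTab : List Int := [0, 0, 1, 0, 2, 1, 4, 3]

-- ===== PORT A =====
-- A's recursion, fuel = n.toNat + 1 (inside Pre_ every recursive call strictly decreases the
-- nonnegative index, so the fuel is never exhausted there). In-range list reads are
-- PySem.List.pyGet? with a .getD 0 default that is never used inside Pre_.
def goA (M : List Int) : Nat → Int → List Int
  | 0, _ => []
  | fuel + 1, n =>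
    if n == 0 then []
    else if n == 1 then [1]
    else if (PySem.List.pyGet? vTab n).getD 0
              + (PySem.List.pyGet? M ((PySem.List.pyGet? pTab n).getD 0)).getD 0
            > (PySem.List.pyGet? M (n - 1)).getD 0 then
      n :: goA M fuel ((PySem.List.pyGet? pTab n).getD 0)
    else
      goA M fuel (n - 1)

def FindSched (M : List Int) (n : Int) : List Int := goA M (n.toNat + 1) n

-- ===== PORT B =====
-- Stage 1 of Source B: the decision table built by the comprehension over range(2, n+1).
def takeList (M : List Int) (n : Int) : List Bool :=
  [false, false] ++ (PySem.List.pyRange 2 (n + 1) 1).map (fun i =>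
    decide ((PySem.List.pyGet? vTab i).getD 0
              + (PySem.List.pyGet? M ((PySem.List.pyGet? pTab i).getD 0)).getD 0
            > (PySem.List.pyGet? M (i - 1)).getD 0))

-- Stage 2 of Source B: the while-loop over the table, fuel-bounded like goA.
def walkB (take : List Bool) : Nat → Int → List Int → List Int
  | 0, _, acc => acc
  | fuel + 1, i, acc =>
    if i > 1 then
      if (PySem.List.pyGet? take i).getD false then
        walkB take fuel ((PySem.List.pyGet? pTab i).getD 0) (acc ++ [i])
      else
        walkB take fuel (i - 1) acc
    else if i == 1 then acc ++ [1]
    else acc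

def FindSched_alt (M : List Int) (n : Int) : List Int :=
  walkB (takeList M n) (n.toNat + 1) n []

-- ===== PRECONDITION & SPEC =====
-- Pre_ excludes: n > 7 or 2 ≤ n > len(M), where the Python A raises IndexError; and n < 0,
-- outside the natural schedule domain, where A's value (when it returns at all) comes from
-- Python's negative-index wraparound and B's empty result is equally accidental.
def Pre_FindSched (M : List Int) (n : Int) : Prop :=
  0 ≤ n ∧ n ≤ 7 ∧ (n ≤ 1 ∨ n ≤ M.length)
instance (M : List Int) (n : Int) : Decidable (Pre_FindSched M n) := by
  unfold Pre_FindSched; infer_instance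

def pvWitness_FindSched : List Int × Int := ([0, 3, 5, 7, 9, 14, 14, 17], 7)

def Spec_FindSched (M : List Int) (n : Int) (out : List Int) : Prop := out = FindSched_alt M n
instance (M : List Int) (n : Int) (out : List Int) : Decidable (Spec_FindSched M n out) := by unfold Spec_FindSched; infer_instance

-- ===== CLAIM (what is proved, stated in full; the proofs are below) =====
def Claim_equal_FindSched : Prop := ∀ (M : List Int) (n : Int), Dom_FindSched M n → Pre_FindSched M n → Spec_FindSched M n (FindSched M n)

-- ===== LEMMAS AND PROOFS =====

-- p-table lookups lie in [0, i) for every i ≥ 2 (entry-by-entry for 2..7; none → 0 beyond)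
lemma pTab_getD_bounds (i : Int) (h2 : 2 ≤ i) :
    0 ≤ (PySem.List.pyGet? pTab i).getD 0 ∧ (PySem.List.pyGet? pTab i).getD 0 < i := by
  have : i = 2 ∨ i = 3 ∨ i = 4 ∨ i = 5 ∨ i = 6 ∨ i = 7 ∨ 8 ≤ i := by omega
  rcases this with h | h | h | h | h | h | h
  · subst h; decide
  · subst h; decide
  · subst h; decide
  · subst h; decide
  · subst h; decide
  · subst h; decide
  · have hnone : PySem.List.pyGet? pTab i = none := by
      rw [PySem.List.pyGet?_eq_none_iff]
      simp [PySem.Raise.InRange, pTab]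
      omega
    rw [hnone]; simp; omega

-- the decision table reports exactly A's branch condition for every 2 ≤ i ≤ n
lemma takeList_lookup (M : List Int) (n i : Int) (h2 : 2 ≤ i) (hn : i ≤ n) :
    (PySem.List.pyGet? (takeList M n) i).getD false
      = decide ((PySem.List.pyGet? vTab i).getD 0
              + (PySem.List.pyGet? M ((PySem.List.pyGet? pTab i).getD 0)).getD 0
            > (PySem.List.pyGet? M (i - 1)).getD 0) := by
  unfold takeList
  have hi : i = ((2 : Int)) + ((i - 2).toNat : Int) := by omega
  have hk : (i - 2).toNat < ((n + 1) - 2).toNat := by omega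
  have := PySem.List.pyGet?_append_right (pre := [false, false])
      (ys := (PySem.List.pyRange 2 (n + 1) 1).map (fun i =>
        decide ((PySem.List.pyGet? vTab i).getD 0
              + (PySem.List.pyGet? M ((PySem.List.pyGet? pTab i).getD 0)).getD 0
            > (PySem.List.pyGet? M (i - 1)).getD 0))) (k := (i - 2).toNat)
  rw [show i = ([false, false] : List Bool).length + ((i - 2).toNat : Int) by simp; omega, this]
  rw [List.getElem?_map]
  rw [show (PySem.List.pyRange 2 (n + 1) 1)[(i - 2).toNat]?
        = some ((PySem.List.pyRange 2 (n + 1) 1)[(i - 2).toNat]'(by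
            rw [PySem.List.length_pyRange_one]; exact hk)) from List.getElem?_eq_getElem _]
  rw [PySem.List.getElem_pyRange_one]
  simp only [Option.getD_some, Option.map_some]
  congr 1

-- the staged walk over the table computes the recursion's result appended to the accumulator
lemma walkB_eq_goA (M : List Int) (n : Int) :
    ∀ (fuel : Nat) (i : Int) (acc : List Int), 0 ≤ i → i ≤ n →
      walkB (takeList M n) fuel i acc = acc ++ goA M fuel i := by
  intro fuel
  induction fuel with
  | zero => intro i acc _ _; simp [goA, walkB]
  | succ f ih =>
    intro i acc hi hin
    by_cases h0 : i = 0
    · simp [goA, walkB, h0]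
    · by_cases h1 : i = 1
      · simp [goA, walkB, h1]
      · have hgt : i > 1 := by omega
        have hp := pTab_getD_bounds i (by omega)
        rw [show walkB (takeList M n) (f+1) i acc
              = if (PySem.List.pyGet? (takeList M n) i).getD false then
                  walkB (takeList M n) f ((PySem.List.pyGet? pTab i).getD 0) (acc ++ [i])
                else walkB (takeList M n) f (i - 1) acc by simp [walkB, hgt]]
        rw [takeList_lookup M n i (by omega) hin]
        by_cases hc : (PySem.List.pyGet? vTab i).getD 0
              + (PySem.List.pyGet? M ((PySem.List.pyGet? pTab i).getD 0)).getD 0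
            > (PySem.List.pyGet? M (i - 1)).getD 0
        · rw [if_pos (by simpa using hc),
            show goA M (f+1) i = i :: goA M f ((PySem.List.pyGet? pTab i).getD 0) by
              simp [goA, h0, h1, hc],
            ih _ _ hp.1 (by omega)]
          simp
        · rw [if_neg (by simpa using hc),
            show goA M (f+1) i = goA M f (i - 1) by simp [goA, h0, h1, hc],
            ih _ _ (by omega) (by omega)]

-- ===== VERDICT (by name: the statement is the Claim_ definition above) =====
theorem FindSched_spec : Claim_equal_FindSched := by
  intro M n _ hpre
  unfold Spec_FindSched FindSched FindSched_alt
  rw [walkB_eq_goA M n (n.toNat + 1) n [] hpre.1 le_rfl]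
  simp
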